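-- pv_equiv track=rewrite | github.com/yyx-35/yolov7-mouse | feature.py | Occurs_n_times
-- ===== SOURCE A (Python) =====
-- def Occurs_n_times(lst):
--     count = 0
--     for i in range(len(lst)):
--         if lst[i] == 9:
--             count += 1
--         else:
--             if count < 599:
--                 for j in range(i - count, i):
--                     lst[j] = 10
--             count = 0
--     # 处理结尾的情况
--     if count < 599:
--         for j in range(len(lst) - count, len(lst)):
--             lst[j] = 10
--     return lst
-- ===== SOURCE B (Python) =====
-- def Occurs_n_times(lst):
--     out = []
--     i = 0
--     n = len(lst)
--     while i < n:
--         j = i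
--         while j < n and lst[j] == lst[i]:
--             j += 1
--         run = j - i
--         if lst[i] == 9 and run < 599:
--             out.extend([10] * run)
--         else:
--             out.extend(lst[i:j])
--         i = j
--     lst[:] = out
--     return lst
-- ===== Notes on version B (the rewrite author's own statement) =====
-- stated objective: alternative
-- what changed: Replaces A's count-and-back-fill index pass (tracking a run counter and rewriting earlier positions) with a run-grouping scan that splits the list into maximal equal runs and emits each run at once (short 9-runs as 10s, others unchanged), written back in place with lst[:] = out.
import Mathlib
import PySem

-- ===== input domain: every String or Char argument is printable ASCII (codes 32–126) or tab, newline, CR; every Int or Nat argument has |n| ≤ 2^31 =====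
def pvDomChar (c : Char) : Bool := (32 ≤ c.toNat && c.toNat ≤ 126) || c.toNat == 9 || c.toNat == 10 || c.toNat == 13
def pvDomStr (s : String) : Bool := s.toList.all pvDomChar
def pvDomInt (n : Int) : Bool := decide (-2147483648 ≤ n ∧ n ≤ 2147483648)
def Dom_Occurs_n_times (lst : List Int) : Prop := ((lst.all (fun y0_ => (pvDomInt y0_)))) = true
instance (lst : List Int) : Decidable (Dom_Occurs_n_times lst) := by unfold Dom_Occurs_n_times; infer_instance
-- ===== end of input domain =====

-- B replaces A's count-and-back-fill index pass by a run-grouping scan (maximal equal runs,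
-- each emitted at once); equivalence is about the RETURN value (both Pythons also mutate lst
-- in place to that same value).

-- ===== PORT A =====
-- one iteration of A's 'for i in range(len(lst))' loop; state = (lst, count)
def pvStepA (st : List Int × Int) (i : Int) : List Int × Int :=
  let l := st.1
  let count := st.2
  -- lst[i]: i is always in range here, so pyGetD with default 0 is exact
  if PySem.List.pyGetD l i 0 == 9 then (l, count + 1)
  else if count < 599 then
    ((PySem.List.pyRange (i - count) i).foldl (fun l j => PySem.List.pySetD l j 10) l, 0)
  else (l, 0)

-- A's trailing block after the loop
def pvFinishA (st : List Int × Int) : List Int :=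
  let l := st.1
  let count := st.2
  if count < 599 then
    (PySem.List.pyRange ((l.length : Int) - count) (l.length : Int)).foldl
      (fun l j => PySem.List.pySetD l j 10) l
  else l

def Occurs_n_times (lst : List Int) : List Int :=
  pvFinishA ((PySem.List.pyRange 0 (lst.length : Int)).foldl pvStepA (lst, 0))

-- ===== PORT B =====
-- termination of the run scan: dropping the current run strictly shortens the list
theorem pv_dropWhile_lt (x : Int) (t : List Int) :
    ((x :: t).dropWhile (fun y => y == x)).length < t.length + 1 := by
  simp only [List.dropWhile_cons, beq_self_eq_true, if_true]
  exact Nat.lt_succ_of_le (t.length_dropWhile_le _)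

-- B's outer while loop: take the maximal run starting at the head, emit it, recurse on the rest
def pvAltGo : List Int → List Int
  | [] => []
  | x :: t =>
    let run := (x :: t).takeWhile (fun y => y == x)
    let rest := (x :: t).dropWhile (fun y => y == x)
    (if x == 9 && decide (run.length < 599) then List.replicate run.length 10 else run)
      ++ pvAltGo rest
termination_by l => l.length
decreasing_by simpa using pv_dropWhile_lt x t

def Occurs_n_times_alt (lst : List Int) : List Int := pvAltGo lst

-- ===== PRECONDITION & SPEC =====
def Spec_Occurs_n_times (lst : List Int) (out : List Int) : Prop := out = Occurs_n_times_alt lst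
instance (lst : List Int) (out : List Int) : Decidable (Spec_Occurs_n_times lst out) := by unfold Spec_Occurs_n_times; infer_instance

-- ===== CLAIM (what is proved, stated in full; the proofs are below) =====
def Claim_equal_Occurs_n_times : Prop := ∀ (lst : List Int), Dom_Occurs_n_times lst → Spec_Occurs_n_times lst (Occurs_n_times lst)

-- ===== LEMMAS AND PROOFS =====

-- what A emits for a finished run of c nines
def pvRepl9 (c : Nat) : List Int := if c < 599 then List.replicate c 10 else List.replicate c 9

-- tail-recursive characterisation of A: c = current count of pending 9s, then the rest
def pvG : Nat → List Int → List Int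
  | c, [] => pvRepl9 c
  | c, x :: r => if x = 9 then pvG (c + 1) r else pvRepl9 c ++ x :: pvG 0 r

-- the write loop 'for j in range(i-count, i): lst[j] = 10' turns the pending 9s into 10s
theorem pvW (c : Nat) : ∀ (out rest : List Int),
    (PySem.List.pyRange (out.length : Int) ((out.length : Int) + c)).foldl
        (fun l j => PySem.List.pySetD l j 10) (out ++ (List.replicate c 9 ++ rest))
      = out ++ (List.replicate c 10 ++ rest) := by
  induction c with
  | zero =>
    intro out rest
    rw [PySem.List.pyRange_one_eq_nil (by omega)]
    simp
  | succ c ih =>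
    intro out rest
    rw [PySem.List.pyRange_one_cons (by omega : (out.length : Int) < (out.length : Int) + (c + 1 : Nat))]
    rw [List.foldl_cons]
    have h1 : PySem.List.pySetD (out ++ (List.replicate (c + 1) 9 ++ rest)) ((out.length : Int)) 10
        = (out ++ [10]) ++ (List.replicate c 9 ++ rest) := by
      rw [PySem.List.pySetD_natCast, List.set_append]
      simp [List.replicate_succ]
    rw [h1]
    have h2 : (out.length : Int) + 1 = (((out ++ [10]).length : Nat) : Int) := by simp
    have h3 : (out.length : Int) + ((c + 1 : Nat) : Int) = (((out ++ [10]).length : Nat) : Int) + (c : Nat) := by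
      simp; ring
    rw [h2, h3, ih (out ++ [10]) rest]
    simp [List.replicate_succ]

-- main loop invariant: processed prefix `out`, pending run of c nines, remaining `rest`
theorem pvMain (rest : List Int) : ∀ (out : List Int) (c : Nat),
    pvFinishA ((PySem.List.pyRange ((out.length : Int) + c)
          (((out.length : Int) + c) + rest.length)).foldl pvStepA
        (out ++ (List.replicate c 9 ++ rest), (c : Int)))
      = out ++ pvG c rest := by
  induction rest with
  | nil =>
    intro out c
    rw [PySem.List.pyRange_one_eq_nil (by simp)]
    rw [List.foldl_nil]
    unfold pvFinishA pvG pvRepl9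
    simp only [List.append_nil]
    by_cases hc : c < 599
    · rw [if_pos (by exact_mod_cast hc)]
      rw [if_pos hc]
      have hlen : ((out ++ List.replicate c 9).length : Int) = (out.length : Int) + c := by simp
      have hlo : ((out ++ List.replicate c 9).length : Int) - (c : Int) = (out.length : Int) := by
        rw [hlen]; ring
      rw [hlo, hlen]
      have := pvW c out []
      simpa using this
    · rw [if_neg (by exact_mod_cast hc)]
      rw [if_neg hc]
  | cons x r ih =>
    intro out c
    rw [PySem.List.pyRange_one_cons (by simp)]
    rw [List.foldl_cons]
    have hget : PySem.List.pyGetD (out ++ (List.replicate c 9 ++ x :: r)) ((out.length : Int) + c) 0 = x := by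
      rw [PySem.List.pyGetD_of_nonneg _ _ (by positivity)]
      rw [show ((out.length : Int) + (c : Int)).toNat = out.length + c by omega]
      simp [List.getD_eq_getElem?_getD]
    by_cases hx : x = 9
    · subst hx
      have hstep : pvStepA (out ++ (List.replicate c 9 ++ 9 :: r), (c : Int)) ((out.length : Int) + c)
          = (out ++ (List.replicate (c + 1) 9 ++ r), ((c + 1 : Nat) : Int)) := by
        simp [pvStepA, hget, List.replicate_succ', List.append_assoc]
      rw [hstep]
      rw [show (out.length : Int) + (c : Int) + 1 = (out.length : Int) + ((c + 1 : Nat) : Int) by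
        push_cast
        ring]
      rw [show (out.length : Int) + (c : Int) + (((9 : Int) :: r).length : Int)
            = ((out.length : Int) + ((c + 1 : Nat) : Int)) + (r.length : Int) by
        simp; ring]
      rw [show pvG c ((9 : Int) :: r) = pvG (c + 1) r from by simp [pvG]]
      exact ih out (c + 1)
    · by_cases hc : c < 599
      · have hw := pvW c out (x :: r)
        have hstep : pvStepA (out ++ (List.replicate c 9 ++ x :: r), (c : Int)) ((out.length : Int) + c)
            = ((out ++ (List.replicate c 10 ++ [x])) ++ (List.replicate 0 9 ++ r), ((0 : Nat) : Int)) := by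
          simp [pvStepA, show ((c : Nat) : Int) < 599 from by exact_mod_cast hc]
          rw [if_neg (fun h => absurd (hget.symm.trans h) hx), hw]
        rw [hstep]
        rw [show (out.length : Int) + (c : Int) + 1
              = (((out ++ (List.replicate c 10 ++ [x])).length : Nat) : Int) + ((0 : Nat) : Int) by
          simp; ring]
        rw [show (out.length : Int) + (c : Int) + ((x :: r).length : Int)
              = ((((out ++ (List.replicate c 10 ++ [x])).length : Nat) : Int) + ((0 : Nat) : Int))
                + (r.length : Int) by
          simp; ring]
        rw [ih (out ++ (List.replicate c 10 ++ [x])) 0]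
        simp [pvG, pvRepl9, hx, hc, List.append_assoc]
      · have hstep : pvStepA (out ++ (List.replicate c 9 ++ x :: r), (c : Int)) ((out.length : Int) + c)
            = ((out ++ (List.replicate c 9 ++ [x])) ++ (List.replicate 0 9 ++ r), ((0 : Nat) : Int)) := by
          simp [pvStepA, show ¬ ((c : Nat) : Int) < 599 from by exact_mod_cast hc]
          intro h; exact absurd (hget.symm.trans h) hx
        rw [hstep]
        rw [show (out.length : Int) + (c : Int) + 1
              = (((out ++ (List.replicate c 9 ++ [x])).length : Nat) : Int) + ((0 : Nat) : Int) by
          simp; ring]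
        rw [show (out.length : Int) + (c : Int) + ((x :: r).length : Int)
              = ((((out ++ (List.replicate c 9 ++ [x])).length : Nat) : Int) + ((0 : Nat) : Int))
                + (r.length : Int) by
          simp; ring]
        rw [ih (out ++ (List.replicate c 9 ++ [x])) 0]
        simp [pvG, pvRepl9, hx, hc, List.append_assoc]

theorem pvAltGo_cons_ne (x : Int) (r : List Int) (hx : x ≠ 9) :
    pvAltGo (x :: r) = x :: pvAltGo r := by
  match r with
  | [] => simp [pvAltGo, hx]
  | y :: r' =>
    by_cases hy : y = x
    · subst hy
      rw [pvAltGo, pvAltGo]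
      simp [hx]
    · rw [pvAltGo]
      simp [hx, hy]

theorem pvAltGo_rep (c : Nat) (l : List Int)
    (hl : l.takeWhile (fun y => y == (9 : Int)) = []) :
    pvAltGo (List.replicate c 9 ++ l) = pvRepl9 c ++ pvAltGo l := by
  have hdrop : l.dropWhile (fun y => y == (9 : Int)) = l := by
    conv_rhs => rw [← List.takeWhile_append_dropWhile (p := fun y => y == (9 : Int)) (l := l)]
    rw [hl]; simp
  match c with
  | 0 => simp [pvRepl9]
  | c' + 1 =>
    have hrw : List.replicate (c' + 1) 9 ++ l = 9 :: (List.replicate c' 9 ++ l) := by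
      simp [List.replicate_succ]
    rw [hrw, pvAltGo]
    have htake : (9 :: (List.replicate c' 9 ++ l)).takeWhile (fun y => y == (9 : Int))
        = List.replicate (c' + 1) 9 := by
      simp [hl, List.replicate_succ]
    have hdrop2 : (9 :: (List.replicate c' 9 ++ l)).dropWhile (fun y => y == (9 : Int)) = l := by
      simp [hdrop]
    rw [htake, hdrop2]
    simp [pvRepl9]

theorem pvG_eq (l : List Int) : ∀ c : Nat, pvG c l = pvAltGo (List.replicate c 9 ++ l) := by
  induction l with
  | nil =>
    intro c
    rw [pvG]
    have h := pvAltGo_rep c [] (by simp)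
    simp only [List.append_nil] at h
    rw [List.append_nil, h]
    simp [pvAltGo]
  | cons x r ih =>
    intro c
    by_cases hx : x = 9
    · subst hx
      rw [pvG]
      simp only []
      rw [ih (c + 1)]
      simp [List.replicate_succ']
    · rw [pvG]
      rw [if_neg hx]
      rw [pvAltGo_rep c (x :: r) (by simp [hx])]
      rw [pvAltGo_cons_ne x r hx]
      have h0 := ih 0
      simp only [List.replicate_zero, List.nil_append] at h0
      rw [h0]

-- ===== VERDICT (by name: the statement is the Claim_ definition above) =====
theorem Occurs_n_times_spec : Claim_equal_Occurs_n_times := by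
  intro lst _
  unfold Spec_Occurs_n_times Occurs_n_times Occurs_n_times_alt
  have h := pvMain lst [] 0
  simp only [List.length_nil, List.replicate_zero, List.nil_append, Nat.cast_zero, zero_add,
    List.length_nil] at h
  rw [h, pvG_eq lst 0]
  simp
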